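-- pv_equiv track=rewrite | github.com/Krapanuk/AdventOfCode2023 | AOCDay9-2.py | addMissings
-- ===== SOURCE A (Python) =====
-- def addMissings(SubArray):
-- 	checkCount = 0
-- 	everythingsZero = False
-- 	DiffIterations = []
-- 	DiffIterations.append(SubArray)
-- 	while everythingsZero == False:
-- 		DiffArray = []
-- 		everythingsZero = True
-- 		for i in range (1, len(DiffIterations[checkCount])): # For all values in (Sub)SubArray at position checkCount of the Array SubArray
-- 			firstValue = int(DiffIterations[checkCount][i-1])
-- 			secondValue = int(DiffIterations[checkCount][i])
-- 			difference = secondValue - firstValue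
-- 			DiffArray.append(str(difference))
-- 			if difference != 0: everythingsZero = False
-- 		DiffIterations.append(DiffArray)
-- 		checkCount += 1
-- 	return(DiffIterations)
-- ===== SOURCE B (Python) =====
-- def addMissings(SubArray):
--     def rec(row):
--         diffs = [int(b) - int(a) for a, b in zip(row, row[1:])]
--         diffRow = [str(d) for d in diffs]
--         if any(d != 0 for d in diffs):
--             return [row] + rec(diffRow)
--         return [row, diffRow]
--     return rec(SubArray)
-- ===== Notes on version B (the rewrite author's own statement) =====
-- stated objective: simpler
-- what changed: Replaces A's while-loop with a growing DiffIterations list, an index counter and an everythingsZero flag by a direct recursion on a single row: build the pairwise-difference row via zip and recurse until it is all zero.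
import Mathlib
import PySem

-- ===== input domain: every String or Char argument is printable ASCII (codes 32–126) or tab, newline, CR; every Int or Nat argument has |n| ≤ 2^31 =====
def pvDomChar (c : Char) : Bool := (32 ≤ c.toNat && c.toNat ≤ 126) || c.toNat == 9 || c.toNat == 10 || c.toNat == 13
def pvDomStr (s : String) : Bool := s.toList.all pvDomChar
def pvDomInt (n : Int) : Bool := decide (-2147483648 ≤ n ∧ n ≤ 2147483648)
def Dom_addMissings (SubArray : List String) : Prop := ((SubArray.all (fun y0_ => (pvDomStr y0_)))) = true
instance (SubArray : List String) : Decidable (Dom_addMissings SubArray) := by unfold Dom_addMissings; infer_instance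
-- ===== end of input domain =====

-- B replaces A's while-loop over a growing DiffIterations list + index counter + flag
-- by a direct recursion on a single row (zip-built difference row until all zero); objective: simpler.


-- int(s); under Pre_ every parsed string succeeds, so the default is never taken
def pvInt (s : String) : Int := (PySem.Int.ofStr? s).getD 0

-- ===== PORT A =====
-- one iteration of the inner for-loop body (kept as a helper so lemmas can name it)
def aStep (row : List String) (st : List String × Bool) (i : Int) : List String × Bool :=
  let firstValue := pvInt ((PySem.List.pyGet? row (i - 1)).getD "")
  let secondValue := pvInt ((PySem.List.pyGet? row i).getD "")
  let difference := secondValue - firstValue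
  let DiffArray := st.1 ++ [PySem.Int.toStr difference]
  let everythingsZero := if difference ≠ 0 then false else st.2
  (DiffArray, everythingsZero)

-- the inner for-loop: builds DiffArray and the everythingsZero flag
def aInner (row : List String) : List String × Bool :=
  (PySem.List.pyRange 1 (row.length : Int) 1).foldl (aStep row) ([], true)

-- the while-loop; fuel only guards totality: each diff row is one shorter, so
-- SubArray.length + 2 iterations always suffice (proved in loop_spec below)
def aLoop : Nat → List (List String) → Nat → List (List String)
  | 0, DiffIterations, _ => DiffIterations
  | fuel + 1, DiffIterations, checkCount =>
      let row := (PySem.List.pyGet? DiffIterations (checkCount : Int)).getD []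
      let st := aInner row
      let DiffIterations' := DiffIterations ++ [st.1]
      if st.2 then DiffIterations' else aLoop fuel DiffIterations' (checkCount + 1)

def addMissings (SubArray : List String) : List (List String) :=
  aLoop (SubArray.length + 2) [SubArray] 0

-- ===== PORT B =====
def bDiffs (row : List String) : List Int :=
  (row.zip row.tail).map (fun p => pvInt p.2 - pvInt p.1)

def bRec (row : List String) : List (List String) :=
  let diffs := bDiffs row
  let diffRow := diffs.map PySem.Int.toStr
  if h : diffs.any (fun d => decide (d ≠ 0)) then [row] ++ bRec diffRow
  else [row, diffRow]
termination_by row.length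
decreasing_by
  cases row with
  | nil =>
      obtain ⟨x, hx, _⟩ := List.any_eq_true.mp h
      have hx' : x ∈ bDiffs [] := hx
      simp [bDiffs] at hx'
  | cons x xs =>
      simp only [bDiffs, List.length_map, List.length_zip, List.tail_cons, List.length_cons]
      omega

def addMissings_alt (SubArray : List String) : List (List String) :=
  bRec SubArray

-- ===== PRECONDITION & SPEC =====
-- Pre_ excludes exactly the inputs on which Python's int() raises ValueError in A;
-- int() is only reached when the row has at least two elements
def Pre_addMissings (SubArray : List String) : Prop :=
  SubArray.length ≤ 1 ∨ SubArray.all (fun s => (PySem.Int.ofStr? s).isSome) = true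
instance (SubArray : List String) : Decidable (Pre_addMissings SubArray) := by
  unfold Pre_addMissings; infer_instance

def pvWitness_addMissings : List String := ["3", "6", "9", "12"]

def Spec_addMissings (SubArray : List String) (out : List (List String)) : Prop := out = addMissings_alt SubArray
instance (SubArray : List String) (out : List (List String)) : Decidable (Spec_addMissings SubArray out) := by unfold Spec_addMissings; infer_instance

-- ===== CLAIM (what is proved, stated in full; the proofs are below) =====
def Claim_equal_addMissings : Prop := ∀ (SubArray : List String), Dom_addMissings SubArray → Pre_addMissings SubArray → Spec_addMissings SubArray (addMissings SubArray)

-- ===== LEMMAS AND PROOFS =====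

theorem bDiffs_cons2 (b c : String) (rest : List String) :
    bDiffs (b :: c :: rest) = (pvInt c - pvInt b) :: bDiffs (c :: rest) := by
  simp [bDiffs]

theorem bDiffs_len (row : List String) (h : row ≠ []) :
    (bDiffs row).length = row.length - 1 := by
  cases row with
  | nil => simp at h
  | cons x xs => simp [bDiffs, List.length_zip]

theorem bRec_eq (row : List String) :
    bRec row = if (bDiffs row).any (fun d => decide (d ≠ 0))
               then [row] ++ bRec ((bDiffs row).map PySem.Int.toStr)
               else [row, (bDiffs row).map PySem.Int.toStr] := by
  rw [bRec]
  split_ifs <;> simp_all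

theorem aInner_go (suf : List String) : ∀ (pre : List String) (acc : List String) (ez : Bool),
    ((PySem.List.pyRange ((pre.length : Int) + 1) ((pre.length : Int) + (suf.length : Int)) 1).foldl
      (aStep (pre ++ suf)) (acc, ez))
    = (acc ++ (bDiffs suf).map PySem.Int.toStr,
       ez && !((bDiffs suf).any (fun d => decide (d ≠ 0)))) := by
  induction suf using List.twoStepInduction with
  | nil =>
      intro pre acc ez
      rw [PySem.List.pyRange_one_eq_nil (by simp)]
      simp [bDiffs]
  | singleton b =>
      intro pre acc ez
      rw [PySem.List.pyRange_one_eq_nil (by simp)]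
      simp [bDiffs]
  | cons_cons b c rest _ ih2 =>
      intro pre acc ez
      rw [PySem.List.pyRange_one_cons (by
        push_cast [List.length_cons]; omega)]
      simp only [List.foldl_cons]
      have h1 : PySem.List.pyGet? (pre ++ b :: c :: rest) ((pre.length : Int) + 1 - 1)
          = some b := by
        simpa using PySem.List.pyGet?_append_length pre (c :: rest) b
      have h2 : PySem.List.pyGet? (pre ++ b :: c :: rest) ((pre.length : Int) + 1)
          = some c := by
        have := PySem.List.pyGet?_append_length (pre ++ [b]) rest c
        simpa [List.append_assoc] using this
      have hstep : aStep (pre ++ b :: c :: rest) (acc, ez) ((pre.length : Int) + 1)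
          = (acc ++ [PySem.Int.toStr (pvInt c - pvInt b)],
             if pvInt c - pvInt b ≠ 0 then false else ez) := by
        simp [aStep, h1, h2]
      rw [hstep]
      have hrange : PySem.List.pyRange ((pre.length : Int) + 1 + 1)
            ((pre.length : Int) + ((b :: c :: rest).length : Int)) 1
          = PySem.List.pyRange (((pre ++ [b]).length : Int) + 1)
            (((pre ++ [b]).length : Int) + ((c :: rest).length : Int)) 1 := by
        congr 1 <;> push_cast [List.length_append, List.length_cons, List.length_nil] <;> ring
      have harr : pre ++ b :: c :: rest = (pre ++ [b]) ++ c :: rest := by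
        simp [List.append_assoc]
      rw [hrange, harr, ih2 c (pre ++ [b])]
      rw [bDiffs_cons2]
      simp only [List.map_cons, List.any_cons, Bool.not_or, List.append_assoc,
        List.singleton_append]
      refine Prod.ext rfl ?_
      by_cases hd : pvInt c - pvInt b ≠ 0 <;> simp [hd, Bool.and_assoc]

theorem aInner_spec (row : List String) :
    aInner row = ((bDiffs row).map PySem.Int.toStr,
                  !((bDiffs row).any (fun d => decide (d ≠ 0)))) := by
  have := aInner_go row [] [] true
  simpa [aInner] using this

theorem loop_spec : ∀ (fuel : Nat) (row : List String) (pref : List (List String)),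
    row.length + 1 ≤ fuel →
    aLoop fuel (pref ++ [row]) pref.length = pref ++ bRec row := by
  intro fuel
  induction fuel with
  | zero => intro row pref h; omega
  | succ n ih =>
      intro row pref h
      rw [aLoop]
      have hget : (PySem.List.pyGet? (pref ++ [row]) ((pref.length : Nat) : Int)).getD []
          = row := by
        rw [show pref ++ [row] = pref ++ row :: [] from rfl,
            PySem.List.pyGet?_append_length]
        rfl
      simp only [hget, aInner_spec]
      cases hany : (bDiffs row).any (fun d => decide (d ≠ 0)) with
      | true =>
        rw [if_neg (by simp [hany])]
        have hne : row ≠ [] := by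
          intro hnil
          rw [hnil] at hany; simp [bDiffs] at hany
        have hlen : ((bDiffs row).map PySem.Int.toStr).length + 1 ≤ n := by
          have h1 := bDiffs_len row hne
          have h2 : 0 < row.length := List.length_pos_of_ne_nil hne
          have h3 : (bDiffs row) ≠ [] := by
            intro hnil; rw [hnil] at hany; simp at hany
          have h4 : 0 < (bDiffs row).length := List.length_pos_of_ne_nil h3
          simp only [List.length_map]
          omega
        have hrec := ih ((bDiffs row).map PySem.Int.toStr) (pref ++ [row]) hlen
        rw [show pref ++ [row] ++ [(bDiffs row).map PySem.Int.toStr]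
              = (pref ++ [row]) ++ [(bDiffs row).map PySem.Int.toStr] by simp,
            show pref.length + 1 = (pref ++ [row]).length by simp,
            hrec, bRec_eq row, if_pos hany]
        simp
      | false =>
        rw [if_pos (by simp [hany])]
        rw [bRec_eq row, if_neg (by intro hc; rw [hc] at hany; cases hany)]
        simp

-- ===== VERDICT (by name: the statement is the Claim_ definition above) =====
theorem addMissings_spec : Claim_equal_addMissings := by
  intro SubArray _ _
  unfold Spec_addMissings addMissings addMissings_alt
  have := loop_spec (SubArray.length + 2) SubArray [] (by omega)
  simpa using this
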